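-- pv_equiv track=rewrite | github.com/pjot/advent-of-code | 2021/19/19.py | most_likely_rotation
-- ===== SOURCE A (Python) =====
-- from collections import defaultdict
--
-- ROTATIONS = [
--     'x', 'y',
--     'xx', 'xy', 'yx', 'yy',
--     'xxx', 'xxy', 'xyx', 'xyy', 'yxx', 'yyx', 'yyy',
--     'xxxy', 'xxyx', 'xxyy', 'xyxx', 'xyyy', 'yxxx', 'yyyx',
--     'xxxyx', 'xyxxx', 'xyyyx',
-- ]
--
-- def add(a, b):
--     return a[0]+b[0], a[1]+b[1], a[2]+b[2]
--
-- def difference(a, b):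
--     return a[0]-b[0], a[1]-b[1], a[2]-b[2]
--
-- def rotate_once(p, axis):
--     x, y, z = p
--     if axis == 'x':
--         return (x, z, -y)
--     if axis == 'y':
--         return (-y, x, z)
--     return (x, y, z)
--
-- def rotate(p, rotation):
--     for c in rotation:
--         p = rotate_once(p, c)
--     return p
--
-- def rotate_scanner(points, r):
--     rotated = []
--     for p in points:
--         rotated.append(rotate(p, r))
--     return rotated
--
-- def shift_scanner(points, delta):
--     shifted = []
--     for p in points:
--         shifted.append(add(p, delta))
--     return shifted
--
-- def all_rotations(points):
--     for r in ROTATIONS: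
--         yield r, rotate_scanner(points, r)
--
-- def most_likely_rotation(one, two):
--     most_likely = ''
--     delta_count = float('inf')
--     for rotation, rotated in all_rotations(two):
--         deltas = defaultdict(int)
--         for p in one:
--             for q in rotated:
--                 deltas[difference(p, q)] += 1
--
--         if len(deltas) < delta_count:
--             delta_count = len(deltas)
--             most_likely = rotation
--
--             common_delta = None
--             count = 0
--             for delta, c in deltas.items():
--                 if c > count:
--                     count = c
--                     common_delta = delta
--
--     rotated = rotate_scanner(two, most_likely)
--     shifted = shift_scanner(rotated, common_delta)
--
--     in_common = set(one) & set(shifted)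
--
--     return most_likely, common_delta, len(in_common)
-- ===== SOURCE B (Python) =====
-- from collections import Counter
--
-- ROTATIONS = [
--     'x', 'y',
--     'xx', 'xy', 'yx', 'yy',
--     'xxx', 'xxy', 'xyx', 'xyy', 'yxx', 'yyx', 'yyy',
--     'xxxy', 'xxyx', 'xxyy', 'xyxx', 'xyyy', 'yxxx', 'yyyx',
--     'xxxyx', 'xyxxx', 'xyyyx',
-- ]
--
-- # rotations as composed 3x3 integer matrices instead of char-by-char point rotation
-- X_MAT = ((1, 0, 0), (0, 0, 1), (0, -1, 0))   # (x, y, z) -> (x, z, -y)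
-- Y_MAT = ((0, -1, 0), (1, 0, 0), (0, 0, 1))   # (x, y, z) -> (-y, x, z)
-- IDENT = ((1, 0, 0), (0, 1, 0), (0, 0, 1))
--
-- def mat_mul(a, b):
--     return tuple(
--         tuple(a[i][0] * b[0][j] + a[i][1] * b[1][j] + a[i][2] * b[2][j] for j in range(3))
--         for i in range(3)
--     )
--
-- def mat_apply(m, p):
--     return (
--         m[0][0] * p[0] + m[0][1] * p[1] + m[0][2] * p[2],
--         m[1][0] * p[0] + m[1][1] * p[1] + m[1][2] * p[2],
--         m[2][0] * p[0] + m[2][1] * p[1] + m[2][2] * p[2],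
--     )
--
-- def rotation_matrix(r):
--     m = IDENT
--     for c in r:
--         step = X_MAT if c == 'x' else (Y_MAT if c == 'y' else IDENT)
--         m = mat_mul(step, m)
--     return m
--
-- def rotate_all(points, r):
--     m = rotation_matrix(r)
--     return [mat_apply(m, t) for t in points]
--
-- def distinct_differences(one, rotated):
--     return len({(p[0] - q[0], p[1] - q[1], p[2] - q[2]) for p in one for q in rotated})
--
-- def most_likely_rotation(one, two):
--     # pass 1: rotation whose difference set is smallest (min is first-wins on ties)
--     best = min(ROTATIONS, key=lambda r: distinct_differences(one, rotate_all(two, r)))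
--     # pass 2: most common difference for the winning rotation (max is first-wins on ties)
--     rotated = rotate_all(two, best)
--     counts = Counter((p[0] - q[0], p[1] - q[1], p[2] - q[2]) for p in one for q in rotated)
--     delta = max(counts, key=counts.get)
--     shifted = [(q[0] + delta[0], q[1] + delta[1], q[2] + delta[2]) for q in rotated]
--     return best, delta, len(set(one) & set(shifted))
-- ===== Notes on version B (the rewrite author's own statement) =====
-- stated objective: alternative
-- what changed: Rotations are represented as composed 3x3 integer matrices (built once per rotation string and applied by matrix-vector product instead of folding rotate_once over the string for every point), and A's fused manual fold that tracks rotation, delta_count, common_delta and count together is replaced by two staged builtin selections: min(ROTATIONS, key=#distinct differences) picks the rotation, then a Counter over the winner's differences and max(counts, key=counts.get) picks the delta.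
-- outside the precondition, e.g. on most_likely_rotation([], []): A returns ('x', None, 0), B raises ValueError; on most_likely_rotation([(0, 0, 0)], []): A returns ('x', None, 0), B raises ValueError
import Mathlib
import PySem

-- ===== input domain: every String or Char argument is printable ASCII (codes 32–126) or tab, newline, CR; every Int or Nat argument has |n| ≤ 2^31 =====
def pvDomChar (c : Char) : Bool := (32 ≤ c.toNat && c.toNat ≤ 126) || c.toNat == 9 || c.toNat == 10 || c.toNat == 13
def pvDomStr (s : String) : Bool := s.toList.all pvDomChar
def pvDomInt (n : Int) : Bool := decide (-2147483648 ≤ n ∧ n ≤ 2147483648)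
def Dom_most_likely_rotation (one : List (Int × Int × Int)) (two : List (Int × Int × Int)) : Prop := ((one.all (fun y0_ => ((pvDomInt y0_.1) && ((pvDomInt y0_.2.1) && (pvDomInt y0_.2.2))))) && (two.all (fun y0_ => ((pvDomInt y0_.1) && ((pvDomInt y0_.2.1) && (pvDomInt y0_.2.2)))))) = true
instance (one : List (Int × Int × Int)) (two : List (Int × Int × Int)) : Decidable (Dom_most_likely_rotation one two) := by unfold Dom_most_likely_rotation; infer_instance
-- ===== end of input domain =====

-- B represents each rotation string as a composed 3x3 integer matrix (built once, applied by
-- matrix-vector product) and replaces A's fused manual argmin/argmax fold by two staged builtin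
-- selections (min by distinct-difference count, then Counter + max for the winner's delta) —
-- an alternative decomposition, same asymptotic cost.

-- ===== PORT A =====
def pvROTATIONS : List String :=
  ["x", "y",
   "xx", "xy", "yx", "yy",
   "xxx", "xxy", "xyx", "xyy", "yxx", "yyx", "yyy",
   "xxxy", "xxyx", "xxyy", "xyxx", "xyyy", "yxxx", "yyyx",
   "xxxyx", "xyxxx", "xyyyx"]

def pvAdd (a b : Int × Int × Int) : Int × Int × Int :=
  (a.1 + b.1, a.2.1 + b.2.1, a.2.2 + b.2.2)

def pvDifference (a b : Int × Int × Int) : Int × Int × Int :=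
  (a.1 - b.1, a.2.1 - b.2.1, a.2.2 - b.2.2)

def pvRotateOnce (p : Int × Int × Int) (axis : Char) : Int × Int × Int :=
  if axis = 'x' then (p.1, p.2.2, -p.2.1)
  else if axis = 'y' then (-p.2.1, p.1, p.2.2)
  else (p.1, p.2.1, p.2.2)

def pvRotate (p : Int × Int × Int) (rotation : String) : Int × Int × Int :=
  rotation.toList.foldl pvRotateOnce p

def pvRotateScanner (points : List (Int × Int × Int)) (r : String) : List (Int × Int × Int) :=
  points.foldl (fun acc p => acc ++ [pvRotate p r]) []

def pvShiftScanner (points : List (Int × Int × Int)) (delta : Int × Int × Int) : List (Int × Int × Int) :=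
  points.foldl (fun acc p => acc ++ [pvAdd p delta]) []

-- A's loop body: state = (most_likely, delta_count (none = inf), common_delta, count)
def pvStepA (one two : List (Int × Int × Int))
    (s : String × Option Int × Option (Int × Int × Int) × Int) (rotation : String) :
    String × Option Int × Option (Int × Int × Int) × Int :=
  let rotated := pvRotateScanner two rotation
  let deltas : PySem.Dict (Int × Int × Int) Int :=
    one.foldl (fun d p => rotated.foldl (fun d q => d.modify (pvDifference p q) 0 (· + 1)) d)
      PySem.Dict.empty
  if (match s.2.1 with | none => true | some v => decide ((deltas.size : Int) < v)) then
    let cm := deltas.items.foldl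
      (fun (st : Option (Int × Int × Int) × Int) kv => if kv.2 > st.2 then (some kv.1, kv.2) else st)
      (none, 0)
    (rotation, some (deltas.size : Int), cm.1, cm.2)
  else s

def most_likely_rotation (one : List (Int × Int × Int)) (two : List (Int × Int × Int)) :
    String × (Int × Int × Int) × Int :=
  let s := pvROTATIONS.foldl (pvStepA one two) ("", none, none, 0)
  match s.2.2.1 with
  | some cd =>
      let rotated := pvRotateScanner two s.1
      let shifted := pvShiftScanner rotated cd
      (s.1, cd, ((PySem.Set.inter (PySem.Set.ofList one) (PySem.Set.ofList shifted)).length : Int))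
  | none => (s.1, (0, 0, 0), 0)   -- common_delta is None: Python raises TypeError / returns None (outside Pre_)

-- ===== PORT B =====
abbrev pvMat3 : Type := (Int × Int × Int) × (Int × Int × Int) × (Int × Int × Int)

def pvXMat : pvMat3 := ((1, 0, 0), (0, 0, 1), (0, -1, 0))
def pvYMat : pvMat3 := ((0, -1, 0), (1, 0, 0), (0, 0, 1))
def pvIdent : pvMat3 := ((1, 0, 0), (0, 1, 0), (0, 0, 1))

def pvMatMul (a b : pvMat3) : pvMat3 :=
  ((a.1.1 * b.1.1 + a.1.2.1 * b.2.1.1 + a.1.2.2 * b.2.2.1,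
    a.1.1 * b.1.2.1 + a.1.2.1 * b.2.1.2.1 + a.1.2.2 * b.2.2.2.1,
    a.1.1 * b.1.2.2 + a.1.2.1 * b.2.1.2.2 + a.1.2.2 * b.2.2.2.2),
   (a.2.1.1 * b.1.1 + a.2.1.2.1 * b.2.1.1 + a.2.1.2.2 * b.2.2.1,
    a.2.1.1 * b.1.2.1 + a.2.1.2.1 * b.2.1.2.1 + a.2.1.2.2 * b.2.2.2.1,
    a.2.1.1 * b.1.2.2 + a.2.1.2.1 * b.2.1.2.2 + a.2.1.2.2 * b.2.2.2.2),
   (a.2.2.1 * b.1.1 + a.2.2.2.1 * b.2.1.1 + a.2.2.2.2 * b.2.2.1,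
    a.2.2.1 * b.1.2.1 + a.2.2.2.1 * b.2.1.2.1 + a.2.2.2.2 * b.2.2.2.1,
    a.2.2.1 * b.1.2.2 + a.2.2.2.1 * b.2.1.2.2 + a.2.2.2.2 * b.2.2.2.2))

def pvMatApply (m : pvMat3) (p : Int × Int × Int) : Int × Int × Int :=
  (m.1.1 * p.1 + m.1.2.1 * p.2.1 + m.1.2.2 * p.2.2,
   m.2.1.1 * p.1 + m.2.1.2.1 * p.2.1 + m.2.1.2.2 * p.2.2,
   m.2.2.1 * p.1 + m.2.2.2.1 * p.2.1 + m.2.2.2.2 * p.2.2)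

-- Python's inline conditional 'X_MAT if c == 'x' else (Y_MAT if c == 'y' else IDENT)'
def pvAxisStep (c : Char) : pvMat3 :=
  if c = 'x' then pvXMat else if c = 'y' then pvYMat else pvIdent

def pvRotationMatrix (r : String) : pvMat3 :=
  r.toList.foldl (fun m c => pvMatMul (pvAxisStep c) m) pvIdent

def pvRotateAll (points : List (Int × Int × Int)) (r : String) : List (Int × Int × Int) :=
  let m := pvRotationMatrix r
  points.map (fun t => pvMatApply m t)

def pvDistinctDifferences (one rotated : List (Int × Int × Int)) : Int :=
  ((PySem.Set.ofList (one.flatMap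
      (fun p => rotated.map (fun q => (p.1 - q.1, p.2.1 - q.2.1, p.2.2 - q.2.2))))).length : Int)

def most_likely_rotation_alt (one : List (Int × Int × Int)) (two : List (Int × Int × Int)) :
    String × (Int × Int × Int) × Int :=
  match PySem.List.min? pvROTATIONS (fun r => pvDistinctDifferences one (pvRotateAll two r)) with
  | none => ("", (0, 0, 0), 0)   -- unreachable: ROTATIONS is nonempty
  | some best =>
      let rotated := pvRotateAll two best
      let counts := PySem.Dict.counter (one.flatMap
        (fun p => rotated.map (fun q => (p.1 - q.1, p.2.1 - q.2.1, p.2.2 - q.2.2))))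
      match PySem.List.max? counts.keys (fun k => counts.getD k 0) with
      | some delta =>
          let shifted := rotated.map (fun q => (q.1 + delta.1, q.2.1 + delta.2.1, q.2.2 + delta.2.2))
          (best, delta, ((PySem.Set.inter (PySem.Set.ofList one) (PySem.Set.ofList shifted)).length : Int))
      | none => (best, (0, 0, 0), 0)   -- max of an empty Counter raises ValueError (outside Pre_)

-- ===== PRECONDITION & SPEC =====
-- Pre_ excludes an empty `one` or `two`: there every difference Counter is empty, A's common_delta
-- stays None and A either raises TypeError (shifting by None) or returns None in the delta slot.
def Pre_most_likely_rotation (one : List (Int × Int × Int)) (two : List (Int × Int × Int)) : Prop :=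
  one ≠ [] ∧ two ≠ []
instance (one : List (Int × Int × Int)) (two : List (Int × Int × Int)) : Decidable (Pre_most_likely_rotation one two) := by unfold Pre_most_likely_rotation; infer_instance

def pvWitness_most_likely_rotation : (List (Int × Int × Int)) × (List (Int × Int × Int)) :=
  ([(1, 2, 3), (4, 5, 6)], [(0, 1, 0), (3, 4, 3)])

def Spec_most_likely_rotation (one : List (Int × Int × Int)) (two : List (Int × Int × Int)) (out : String × (Int × Int × Int) × Int) : Prop := out = most_likely_rotation_alt one two
instance (one : List (Int × Int × Int)) (two : List (Int × Int × Int)) (out : String × (Int × Int × Int) × Int) : Decidable (Spec_most_likely_rotation one two out) := by unfold Spec_most_likely_rotation; infer_instance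

-- ===== CLAIM (what is proved, stated in full; the proofs are below) =====
def Claim_equal_most_likely_rotation : Prop := ∀ (one : List (Int × Int × Int)) (two : List (Int × Int × Int)), Dom_most_likely_rotation one two → Pre_most_likely_rotation one two → Spec_most_likely_rotation one two (most_likely_rotation one two)

-- ===== LEMMAS AND PROOFS =====

-- B's matrices agree with A's char-by-char rotation
lemma pv_matApply_mul (a b : pvMat3) (p : Int × Int × Int) :
    pvMatApply (pvMatMul a b) p = pvMatApply a (pvMatApply b p) := by
  simp only [pvMatMul, pvMatApply, Prod.mk.injEq]
  refine ⟨by ring, by ring, by ring⟩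

lemma pv_matApply_ident (p : Int × Int × Int) : pvMatApply pvIdent p = p := by
  simp [pvIdent, pvMatApply]

lemma pv_axisStep_apply (c : Char) (p : Int × Int × Int) :
    pvMatApply (pvAxisStep c) p = pvRotateOnce p c := by
  unfold pvAxisStep pvRotateOnce
  split_ifs <;>
    simp only [pvXMat, pvYMat, pvIdent, pvMatApply, Prod.mk.injEq] <;>
    refine ⟨by ring, by ring, by ring⟩

lemma pv_rotmat_fold (cs : List Char) :
    ∀ (m : pvMat3) (p : Int × Int × Int),
      pvMatApply (cs.foldl (fun m c => pvMatMul (pvAxisStep c) m) m) p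
        = cs.foldl pvRotateOnce (pvMatApply m p) := by
  induction cs with
  | nil => intro m p; rfl
  | cons c t ih =>
      intro m p
      simp only [List.foldl_cons]
      rw [ih, pv_matApply_mul, pv_axisStep_apply]

lemma pv_rotationMatrix_apply (r : String) (p : Int × Int × Int) :
    pvMatApply (pvRotationMatrix r) p = pvRotate p r := by
  unfold pvRotationMatrix pvRotate
  rw [pv_rotmat_fold, pv_matApply_ident]

lemma pv_rotateAll_eq (two : List (Int × Int × Int)) (r : String) :
    pvRotateAll two r = pvRotateScanner two r := by
  unfold pvRotateAll pvRotateScanner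
  rw [PySem.List.foldl_append_singleton_eq_map]
  simp [pv_rotationMatrix_apply]

-- the list of all pairwise differences for rotation r (A's nested loops, p-major order)
def pvDiffs (one two : List (Int × Int × Int)) (r : String) : List (Int × Int × Int) :=
  one.flatMap (fun p => (pvRotateScanner two r).map (fun q => pvDifference p q))

-- B's min? key, identified with the size of A's deltas dict
def pvKeyN (one two : List (Int × Int × Int)) (r : String) : Int :=
  ((PySem.Set.ofList (pvDiffs one two r)).length : Int)

lemma pv_key_eq (one two : List (Int × Int × Int)) :
    (fun r => pvDistinctDifferences one (pvRotateAll two r)) = pvKeyN one two := by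
  funext r
  unfold pvDistinctDifferences pvKeyN pvDiffs
  rw [pv_rotateAll_eq]
  rfl

-- A's inner argmin/argmax payload for rotation r, expressed over the counter of pvDiffs
def pvCM (one two : List (Int × Int × Int)) (r : String) : Option (Int × Int × Int) × Int :=
  (PySem.Dict.counter (pvDiffs one two r)).items.foldl
    (fun (st : Option (Int × Int × Int) × Int) kv => if kv.2 > st.2 then (some kv.1, kv.2) else st)
    (none, 0)

-- B's pass-one selection, written as the foldl underlying PySem.List.min?
def pvStepMin (one two : List (Int × Int × Int)) (acc : Option String) (x : String) : Option String :=
  match acc with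
  | none => some x
  | some m => if pvKeyN one two x < pvKeyN one two m then some x else some m

lemma pv_min?_eq_fold (one two : List (Int × Int × Int)) (rs : List String) :
    PySem.List.min? rs (pvKeyN one two) = rs.foldl (pvStepMin one two) none := by
  simp only [PySem.List.min?]
  congr 1
  funext acc x
  cases acc <;> simp [pvStepMin]

-- the invariant tying A's loop state to B's running minimum
def pvRel (one two : List (Int × Int × Int)) (sB : Option String)
    (sA : String × Option Int × Option (Int × Int × Int) × Int) : Prop :=
  match sB with
  | none => sA = ("", none, none, 0)
  | some m => sA = (m, some (pvKeyN one two m), pvCM one two m)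

lemma pv_deltas_eq (one two : List (Int × Int × Int)) (r : String) :
    one.foldl (fun d p => (pvRotateScanner two r).foldl
        (fun d q => d.modify (pvDifference p q) 0 (· + 1)) d) PySem.Dict.empty
      = PySem.Dict.counter (pvDiffs one two r) := by
  rw [PySem.Dict.counter_eq_foldl, pvDiffs, List.foldl_flatMap]
  simp [List.foldl_map]

lemma pv_size_eq (L : List (Int × Int × Int)) :
    (PySem.Dict.counter L).size = (PySem.Set.ofList L).length := by
  simp [PySem.Dict.size, PySem.Dict.items_counter]

lemma pv_step_rel (one two : List (Int × Int × Int)) (sB : Option String)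
    (sA : String × Option Int × Option (Int × Int × Int) × Int) (r : String)
    (h : pvRel one two sB sA) :
    pvRel one two (pvStepMin one two sB r) (pvStepA one two sA r) := by
  have hsize : ((PySem.Dict.counter (pvDiffs one two r)).size : Int) = pvKeyN one two r := by
    rw [pv_size_eq]; rfl
  match sB with
  | none =>
      simp only [pvRel] at h
      subst h
      simp only [pvStepA, pvStepMin, pv_deltas_eq, pvRel]
      rw [hsize]
      simp [pvCM]
  | some m =>
      simp only [pvRel] at h
      subst h
      simp only [pvStepA, pvStepMin, pv_deltas_eq, pvRel]
      rw [hsize]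
      by_cases hlt : pvKeyN one two r < pvKeyN one two m
      · simp only [hlt, decide_true, if_pos]
        simp [pvCM]
      · simp only [hlt, decide_false, if_false]
        simp

lemma pv_fold_rel (one two : List (Int × Int × Int)) :
    ∀ (rs : List String) (sB : Option String)
      (sA : String × Option Int × Option (Int × Int × Int) × Int),
      pvRel one two sB sA →
      pvRel one two (rs.foldl (pvStepMin one two) sB) (rs.foldl (pvStepA one two) sA) := by
  intro rs
  induction rs with
  | nil => intro sB sA h; exact h
  | cons r t ih => intro sB sA h; exact ih _ _ (pv_step_rel one two sB sA r h)

lemma pv_foldMin_some (one two : List (Int × Int × Int)) :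
    ∀ (rs : List String) (m : String),
      ∃ m', rs.foldl (pvStepMin one two) (some m) = some m' := by
  intro rs
  induction rs with
  | nil => intro m; exact ⟨m, rfl⟩
  | cons r t ih =>
      intro m
      simp only [List.foldl_cons, pvStepMin]
      split
      · exact ih _
      · exact ih _

-- A's stored argmax payload is B's max? over the Counter of the same difference list
lemma pv_argmax_fold (f : (Int × Int × Int) → Int) :
    ∀ (ks : List (Int × Int × Int)) (o : Option (Int × Int × Int)) (c : Int),
      (∀ k ∈ ks, 1 ≤ f k) →
      (match o with | none => c = 0 | some m => c = f m) →
      ((ks.map (fun k => (k, f k))).foldl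
          (fun (st : Option (Int × Int × Int) × Int) kv =>
            if kv.2 > st.2 then (some kv.1, kv.2) else st) (o, c)).1
        = ks.foldl
            (fun acc x => match acc with
              | none => some x
              | some m => if f m < f x then some x else some m) o := by
  intro ks
  induction ks with
  | nil => intro o c _ _; rfl
  | cons k t ih =>
      intro o c hpos ho
      have hk : 1 ≤ f k := hpos k (by simp)
      match o with
      | none =>
          subst ho
          simp only [List.map_cons, List.foldl_cons]
          rw [if_pos (by omega)]
          exact ih (some k) (f k) (fun x hx => hpos x (by simp [hx])) rfl
      | some m =>
          subst ho
          simp only [List.map_cons, List.foldl_cons]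
          by_cases h : f m < f k
          · rw [if_pos (by omega), if_pos h]
            exact ih (some k) (f k) (fun x hx => hpos x (by simp [hx])) rfl
          · rw [if_neg (by omega), if_neg h]
            exact ih (some m) (f m) (fun x hx => hpos x (by simp [hx])) rfl

lemma pv_cm_eq_max (L : List (Int × Int × Int)) :
    ((PySem.Dict.counter L).items.foldl
        (fun (st : Option (Int × Int × Int) × Int) kv =>
          if kv.2 > st.2 then (some kv.1, kv.2) else st) (none, 0)).1
      = PySem.List.max? (PySem.Dict.counter L).keys (fun k => (PySem.Dict.counter L).getD k 0) := by
  have hf : (fun k => (PySem.Dict.counter L).getD k 0) = fun k => ((L.count k : Int)) :=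
    funext (fun k => PySem.Dict.getD_counter L k)
  rw [hf]
  have hpos : ∀ k ∈ PySem.Set.ofList L, (1 : Int) ≤ ((L.count k : Int)) := by
    intro k hk
    have hkL : k ∈ L := (PySem.Set.mem_ofList L k).mp hk
    exact_mod_cast List.count_pos_iff.mpr hkL
  have hmax : PySem.List.max? (PySem.Set.ofList L) (fun k => ((L.count k : Int)))
      = List.foldl
          (fun (acc : Option (Int × Int × Int)) x => match acc with
            | none => some x
            | some m => if ((L.count m : Int)) < ((L.count x : Int)) then some x else some m)
          none (PySem.Set.ofList L) := by
    simp only [PySem.List.max?]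
    apply List.foldl_ext
    intro acc x _
    cases acc <;> rfl
  rw [PySem.Dict.keys_counter, hmax]
  simp only [PySem.Dict.items_counter]
  exact pv_argmax_fold _ (PySem.Set.ofList L) none 0 hpos rfl

-- ===== VERDICT (by name: the statement is the Claim_ definition above) =====
theorem most_likely_rotation_spec : Claim_equal_most_likely_rotation := by
  intro one two _hdom _hpre
  unfold Spec_most_likely_rotation most_likely_rotation most_likely_rotation_alt
  rw [pv_key_eq, pv_min?_eq_fold]
  -- relate the two folds over pvROTATIONS
  have h0 : pvRel one two (none : Option String) ("", none, none, 0) := rfl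
  have hrel := pv_fold_rel one two pvROTATIONS none ("", none, none, 0) h0
  -- B's fold over the nonempty literal list returns some
  have hsome : ∃ m', pvROTATIONS.foldl (pvStepMin one two) none = some m' := by
    show ∃ m', ("x" :: _).foldl (pvStepMin one two) none = some m'
    rw [List.foldl_cons]
    exact pv_foldMin_some one two _ _
  obtain ⟨best, hbest⟩ := hsome
  rw [hbest] at hrel ⊢
  simp only [pvRel] at hrel
  rw [hrel]
  -- B's counter over the rotated differences is the counter of pvDiffs best
  have hcounts : PySem.Dict.counter (one.flatMap
      (fun p => (pvRotateAll two best).map (fun q => (p.1 - q.1, p.2.1 - q.2.1, p.2.2 - q.2.2))))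
      = PySem.Dict.counter (pvDiffs one two best) := by
    rw [pv_rotateAll_eq]; rfl
  -- A's stored argmax is B's max?
  have hcm : (pvCM one two best).1
      = PySem.List.max? (PySem.Dict.counter (pvDiffs one two best)).keys
          (fun k => (PySem.Dict.counter (pvDiffs one two best)).getD k 0) := by
    simpa [pvCM] using pv_cm_eq_max (pvDiffs one two best)
  dsimp only
  rw [hcounts, hcm]
  -- both sides now match on the same Option
  cases hca : PySem.List.max? (PySem.Dict.counter (pvDiffs one two best)).keys
      (fun k => (PySem.Dict.counter (pvDiffs one two best)).getD k 0) with
  | none => rfl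
  | some cd =>
      dsimp only
      -- the shifted lists coincide
      have hshift : pvShiftScanner (pvRotateScanner two best) cd
          = (pvRotateAll two best).map (fun q => (q.1 + cd.1, q.2.1 + cd.2.1, q.2.2 + cd.2.2)) := by
        rw [pv_rotateAll_eq]
        unfold pvShiftScanner
        rw [PySem.List.foldl_append_singleton_eq_map]
        rfl
      rw [hshift]
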